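-- pv_equiv track=rewrite | github.com/ravish-oo/arc-agi-opoch | present.py | _ofa
-- ===== SOURCE A (Python) =====
-- from typing import List, Tuple, Dict, Set, Optional
--
-- def _ofa(patch: List[List[int]]) -> Tuple:
--     """
--     Offset-Fit-Align: normalize patch.
--
--     1. Offset: subtract minimum to make 0-based
--     2. Fit: crop to bounding box of non-(-1) values
--     3. Return as tuple for hashing
--
--     Args:
--         patch: 2D list of values
--
--     Returns:
--         Tuple representation of normalized patch
--     """
--     # Offset: subtract min
--     flat = [v for row in patch for v in row if v != -1]
--     if not flat:
--         return ()
--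
--     min_val = min(flat)
--     patch_offset = [[v - min_val if v != -1 else -1 for v in row] for row in patch]
--
--     # Fit: crop to bounding box
--     min_r, max_r = None, None
--     min_c, max_c = None, None
--
--     n = len(patch_offset)
--     for r in range(n):
--         for c in range(n):
--             if patch_offset[r][c] != -1:
--                 if min_r is None or r < min_r:
--                     min_r = r
--                 if max_r is None or r > max_r:
--                     max_r = r
--                 if min_c is None or c < min_c:
--                     min_c = c
--                 if max_c is None or c > max_c:
--                     max_c = c
--
--     if min_r is None:
--         return ()
--
--     # Extract bounding box
--     cropped = []
--     for r in range(min_r, max_r + 1):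
--         row = []
--         for c in range(min_c, max_c + 1):
--             row.append(patch_offset[r][c])
--         cropped.append(tuple(row))
--
--     return tuple(cropped)
-- ===== SOURCE B (Python) =====
-- from typing import List, Tuple
--
-- def _ofa(patch: List[List[int]]) -> Tuple:
--     """Normalize patch by border-trimming: instead of computing a bounding box
--     with min/max index scans, take the square n x n view and repeatedly strip
--     blank (all -1) border rows, then blank border columns via transposition,
--     finally applying the offset while tupling."""
--     flat = [v for row in patch for v in row if v != -1]
--     if not flat:
--         return ()
--     m = min(flat)
--     n = len(patch)
--     grid = [[row[c] for c in range(n)] for row in patch]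
--
--     def blank(line):
--         return all(v == -1 for v in line)
--
--     def trim(lines):
--         while lines and blank(lines[0]):
--             lines = lines[1:]
--         while lines and blank(lines[-1]):
--             lines = lines[:-1]
--         return lines
--
--     rows = trim(grid)
--     if not rows:
--         return ()
--     cols = trim([list(col) for col in zip(*rows)])
--     return tuple(tuple(v - m if v != -1 else -1 for v in col)
--                  for col in zip(*cols))
-- ===== Notes on version B (the rewrite author's own statement) =====
-- stated objective: alternative
-- what changed: B replaces A's bounding-box computation (min/max index scan plus range-based extraction from an offset grid) with border trimming: it builds the square view, strips blank (all -1) border rows, transposes, strips blank border columns, and transposes back while applying the offset; no bounding-box coordinates are ever computed.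
import Mathlib
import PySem

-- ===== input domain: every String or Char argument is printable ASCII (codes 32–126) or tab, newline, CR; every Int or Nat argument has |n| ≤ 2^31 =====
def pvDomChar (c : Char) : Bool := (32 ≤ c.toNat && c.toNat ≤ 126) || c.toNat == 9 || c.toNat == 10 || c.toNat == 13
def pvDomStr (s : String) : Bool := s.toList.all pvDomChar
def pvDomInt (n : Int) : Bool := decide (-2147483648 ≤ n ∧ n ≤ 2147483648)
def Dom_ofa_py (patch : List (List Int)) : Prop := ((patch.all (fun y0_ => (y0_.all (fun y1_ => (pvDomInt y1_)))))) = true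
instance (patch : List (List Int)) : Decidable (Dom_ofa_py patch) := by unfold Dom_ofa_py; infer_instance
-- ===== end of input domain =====

-- B normalizes by border trimming (strip blank edge rows, transpose, strip blank edge
-- columns, transpose back with the offset) instead of A's min/max bounding-box scan.

-- ===== PORT A =====
-- the four sequential `if min_r is None or …` updates of A's scan, on state (min_r, max_r, min_c, max_c)
def pvBBoxStep (s : Option Nat × Option Nat × Option Nat × Option Nat) (r c : Nat) :
    Option Nat × Option Nat × Option Nat × Option Nat :=
  (match s.1 with | none => some r | some y => some (if r < y then r else y),
   match s.2.1 with | none => some r | some y => some (if y < r then r else y),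
   match s.2.2.1 with | none => some c | some y => some (if c < y then c else y),
   match s.2.2.2 with | none => some c | some y => some (if y < c then c else y))

def ofa_py (patch : List (List Int)) : List (List Int) :=
  let flat := patch.flatMap (fun row => row.filter (fun v => decide (v ≠ -1)))
  if flat.isEmpty then []
  else
    let min_val := (PySem.List.min? flat (fun x => x)).getD 0
    let patch_offset := patch.map (fun row => row.map (fun v => if v ≠ -1 then v - min_val else -1))
    let n := patch_offset.length
    let st := (List.range n).foldl (fun s r =>
        (List.range n).foldl (fun s c =>
          if (patch_offset.getD r []).getD c (-1) ≠ -1 then pvBBoxStep s r c else s) s)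
      (none, none, none, none)
    match st.1, st.2.1, st.2.2.1, st.2.2.2 with
    | some r0, some r1, some c0, some c1 =>
        (List.range' r0 (r1 + 1 - r0)).map (fun r =>
          (List.range' c0 (c1 + 1 - c0)).map (fun c =>
            (patch_offset.getD r []).getD c (-1)))
    | _, _, _, _ => []

-- ===== PORT B =====
def pvBlank (row : List Int) : Bool := row.all (fun v => v == -1)

-- Source B's trim: pop blank lines from the front, then from the back
def pvTrim (l : List (List Int)) : List (List Int) :=
  ((l.dropWhile pvBlank).reverse.dropWhile pvBlank).reverse

-- zip(*l); exact for uniform row lengths, which every use in ofa_py_alt has by construction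
def pvZipT (l : List (List Int)) : List (List Int) :=
  match l with
  | [] => []
  | r :: _ => (List.range r.length).map (fun c => l.map (fun row => row.getD c (-1)))

def ofa_py_alt (patch : List (List Int)) : List (List Int) :=
  let flat := patch.flatMap (fun row => row.filter (fun v => decide (v ≠ -1)))
  if flat.isEmpty then []
  else
    let m := (PySem.List.min? flat (fun x => x)).getD 0
    let n := patch.length
    let grid := patch.map (fun row => (List.range n).map (fun c => row.getD c (-1)))
    let rows := pvTrim grid
    if rows.isEmpty then []
    else
      let cols := pvTrim (pvZipT rows)
      (pvZipT cols).map (fun row => row.map (fun v => if v ≠ -1 then v - m else -1))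

-- ===== PRECONDITION & SPEC =====
-- Pre_ excludes exactly the inputs where the Python A raises IndexError: patches containing a
-- non-(-1) value together with some row shorter than len(patch) (A's square scan indexes it).
def Pre_ofa_py (patch : List (List Int)) : Prop :=
  (∀ row ∈ patch, patch.length ≤ row.length) ∨ (∀ row ∈ patch, ∀ v ∈ row, v = -1)
instance (patch : List (List Int)) : Decidable (Pre_ofa_py patch) := by
  unfold Pre_ofa_py; infer_instance
def pvWitness_ofa_py : List (List Int) := [[3, -1], [-1, 7]]
def Spec_ofa_py (patch : List (List Int)) (out : List (List Int)) : Prop := out = ofa_py_alt patch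
instance (patch : List (List Int)) (out : List (List Int)) : Decidable (Spec_ofa_py patch out) := by unfold Spec_ofa_py; infer_instance

-- ===== CLAIM (what is proved, stated in full; the proofs are below) =====
def Claim_equal_ofa_py : Prop := ∀ (patch : List (List Int)), Dom_ofa_py patch → Pre_ofa_py patch → Spec_ofa_py patch (ofa_py patch)

-- ===== LEMMAS AND PROOFS =====

-- the offset map A applies to every cell
def pvOff (m v : Int) : Int := if v ≠ -1 then v - m else -1

-- cell bridge: reading A's offset grid with defaults = offsetting the raw read
theorem pvCell_bridge (patch : List (List Int)) (m : Int) (r c : Nat) :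
    (((patch.map (fun row => row.map (fun v => if v ≠ -1 then v - m else -1))).getD r []).getD c (-1))
      = pvOff m ((patch.getD r []).getD c (-1)) := by
  simp only [List.getD_eq_getElem?_getD, List.getElem?_map]
  cases hr : patch[r]? with
  | none => simp [pvOff]
  | some row =>
    simp only [Option.map_some, Option.getD_some, List.getElem?_map]
    cases hc : row[c]? with
    | none => simp [pvOff]
    | some v => simp [pvOff]

-- a raw in-range non-(-1) read is a member of flat
theorem pvMem_flat (patch : List (List Int)) (r c : Nat)
    (h : (patch.getD r []).getD c (-1) ≠ -1) :
    (patch.getD r []).getD c (-1) ∈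
      patch.flatMap (fun row => row.filter (fun v => decide (v ≠ -1))) := by
  simp only [List.getD_eq_getElem?_getD] at h ⊢
  cases hr : patch[r]? with
  | none => simp [hr] at h
  | some row =>
    simp only [hr, Option.getD_some] at h ⊢
    cases hc : row[c]? with
    | none => simp [hc] at h
    | some v =>
      simp only [hc, Option.getD_some] at h ⊢
      exact List.mem_flatMap.mpr ⟨row, List.mem_of_getElem? hr,
        List.mem_filter.mpr ⟨List.mem_of_getElem? hc, by simpa using h⟩⟩

-- predicate bridge: the offset cell is non-(-1) iff the raw cell is (m the minimum of flat)
theorem pvPred_bridge (patch : List (List Int)) (m : Int)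
    (hm : PySem.List.min? (patch.flatMap (fun row => row.filter (fun v => decide (v ≠ -1)))) (fun x => x) = some m)
    (r c : Nat) :
    (pvOff m ((patch.getD r []).getD c (-1)) ≠ -1) ↔ ((patch.getD r []).getD c (-1) ≠ -1) := by
  set v := (patch.getD r []).getD c (-1) with hv
  by_cases h : v = -1
  · simp [pvOff, h]
  · have hmem := pvMem_flat patch r c h
    have hle : m ≤ v := PySem.List.min?_isMin hm v hmem
    simp only [pvOff, if_pos h]
    constructor
    · intro _; exact h
    · intro _; omega

-- componentwise update functions of A's bbox fold
def pvStepMin (o : Option Nat) (x : Nat) : Option Nat :=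
  match o with | none => some x | some y => some (if x < y then x else y)
def pvStepMax (o : Option Nat) (x : Nat) : Option Nat :=
  match o with | none => some x | some y => some (if y < x then x else y)

-- the 4-component fold decomposes into four scalar folds
theorem pvFold_decomp (cells : List (Nat × Nat)) :
    ∀ (a b c d : Option Nat),
      cells.foldl (fun s p => pvBBoxStep s p.1 p.2) (a, b, c, d)
        = ((cells.map Prod.fst).foldl pvStepMin a,
           (cells.map Prod.fst).foldl pvStepMax b,
           (cells.map Prod.snd).foldl pvStepMin c,
           (cells.map Prod.snd).foldl pvStepMax d) := by
  induction cells with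
  | nil => intro a b c d; rfl
  | cons p t ih =>
    intro a b c d
    simp only [List.foldl_cons, List.map_cons]
    rw [ih]
    rfl

theorem pvFoldMin_some (t : List Nat) : ∀ (a : Nat), t.foldl pvStepMin (some a) = some (t.foldl min a) := by
  induction t with
  | nil => intro a; rfl
  | cons x t ih =>
    intro a
    simp only [List.foldl_cons, pvStepMin]
    have h1 : (if x < a then x else a) = min a x := by
      by_cases h : x < a <;> simp [h, Nat.min_def]
    rw [h1, ih]

theorem pvFoldMax_some (t : List Nat) : ∀ (a : Nat), t.foldl pvStepMax (some a) = some (t.foldl max a) := by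
  induction t with
  | nil => intro a; rfl
  | cons x t ih =>
    intro a
    simp only [List.foldl_cons, pvStepMax]
    have h1 : (if a < x then x else a) = max a x := by
      by_cases h : a < x <;> simp [h, Nat.max_def] <;> omega
    rw [h1, ih]

theorem pvFoldMin_eq_min? (l : List Nat) :
    l.foldl pvStepMin none = PySem.List.min? l (fun x => x) := by
  cases l with
  | nil => rfl
  | cons x t =>
    rw [PySem.List.min?_id_cons]
    simpa [pvStepMin] using pvFoldMin_some t x

theorem pvFoldMax_eq_max? (l : List Nat) :
    l.foldl pvStepMax none = PySem.List.max? l (fun x => x) := by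
  cases l with
  | nil => rfl
  | cons x t =>
    rw [PySem.List.max?_id_cons]
    simpa [pvStepMax] using pvFoldMax_some t x

-- dropWhile reaches exactly the first index failing q
theorem pvDropWhile_eq_drop {α : Type} (q : α → Bool) :
    ∀ (l : List α) (i : Nat) (hi : i < l.length),
      (∀ j (hj : j < l.length), j < i → q l[j] = true) →
      q (l[i]'hi) = false →
      l.dropWhile q = l.drop i := by
  intro l
  induction l with
  | nil => intro i hi; simp at hi
  | cons a t ih =>
    intro i hi hlo h0
    cases i with
    | zero =>
      simp only [List.getElem_cons_zero] at h0
      simp [h0]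
    | succ i' =>
      have ha : q a = true := by
        have := hlo 0 (by simp) (by omega)
        simpa using this
      simp only [List.dropWhile_cons, ha, if_pos, List.drop_succ_cons]
      exact ih i' (by simpa using hi)
        (fun j hj hji => by
          have := hlo (j + 1) (by simpa using Nat.succ_lt_succ hj) (by omega)
          simpa using this)
        (by simpa using h0)

-- the slice of a list as a map over range'
theorem pvSlice_eq_map_range' {α : Type} (l : List α) (d : α) (a b : Nat) (h : a + b ≤ l.length) :
    (l.drop a).take b = (List.range' a b).map (fun i => l.getD i d) := by
  apply List.ext_getElem
  · simp; omega
  · intro i h1 h2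
    simp only [List.getElem_take, List.getElem_drop, List.getElem_map, List.getElem_range', Nat.one_mul]
    rw [List.getD_eq_getElem l d (by simp at h1; omega)]

-- Source B's trim on a list with a known blank/non-blank border profile is the slice i0..i1
theorem pvTrim_eq_slice (l : List (List Int)) (i0 i1 : Nat) (h01 : i0 ≤ i1) (h1 : i1 < l.length)
    (hlo : ∀ j (hj : j < l.length), j < i0 → pvBlank l[j] = true)
    (h0 : pvBlank (l[i0]'(by omega)) = false)
    (hhi : ∀ j (hj : j < l.length), i1 < j → pvBlank l[j] = true)
    (hi1 : pvBlank (l[i1]'h1) = false) :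
    pvTrim l = (l.drop i0).take (i1 + 1 - i0) := by
  unfold pvTrim
  rw [pvDropWhile_eq_drop pvBlank l i0 (by omega) hlo h0]
  set L := l.length with hL
  have hdl : (l.drop i0).length = L - i0 := by simp [hL]
  have hj0 : L - 1 - i1 < (l.drop i0).reverse.length := by simp [hL]; omega
  rw [pvDropWhile_eq_drop pvBlank (l.drop i0).reverse (L - 1 - i1) hj0
    (fun j hj hji => by
      rw [List.getElem_reverse, List.getElem_drop]
      have hjl : j < L - i0 := by simpa [hL] using hj
      exact hhi _ (by omega) (by omega))
    (by
      rw [List.getElem_reverse, List.getElem_drop]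
      have : i0 + ((l.drop i0).length - 1 - (L - 1 - i1)) = i1 := by
        simp [hL]; omega
      simp only [this]
      exact hi1)]
  apply List.ext_getElem
  · simp [hL]; omega
  · intro i hi1' hi2'
    simp only [List.getElem_reverse, List.getElem_drop, List.getElem_take]
    congr 1
    simp [hL] at hi1' hi2' ⊢
    omega

-- membership in the coordinate list of non-(-1) square cells
theorem pvMem_cells (patch : List (List Int)) (n : Nat) (r c : Nat) :
    ((r, c) ∈ (List.range n).flatMap (fun r =>
        ((List.range n).filter (fun c => decide ((patch.getD r []).getD c (-1) ≠ -1))).map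
          (fun c => (r, c))))
      ↔ (r < n ∧ c < n ∧ (patch.getD r []).getD c (-1) ≠ -1) := by
  constructor
  · intro h
    obtain ⟨r', hr', h2⟩ := List.mem_flatMap.mp h
    obtain ⟨c', hc', heq⟩ := List.mem_map.mp h2
    obtain ⟨hc'mem, hc'p⟩ := List.mem_filter.mp hc'
    injection heq with he1 he2
    subst he1; subst he2
    exact ⟨List.mem_range.mp hr', List.mem_range.mp hc'mem, by simpa using hc'p⟩
  · rintro ⟨h1, h2, h3⟩
    exact List.mem_flatMap.mpr ⟨r, List.mem_range.mpr h1,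
      List.mem_map.mpr ⟨c, List.mem_filter.mpr ⟨List.mem_range.mpr h2, by simpa using h3⟩, rfl⟩⟩

theorem pvMem_map_fst (cells : List (Nat × Nat)) (r : Nat) :
    r ∈ cells.map Prod.fst ↔ ∃ c, (r, c) ∈ cells := by
  constructor
  · intro h
    obtain ⟨⟨a, b⟩, hp, he⟩ := List.mem_map.mp h
    cases he
    exact ⟨b, hp⟩
  · rintro ⟨c, hc⟩
    exact List.mem_map.mpr ⟨(r, c), hc, rfl⟩

theorem pvMem_map_snd (cells : List (Nat × Nat)) (c : Nat) :
    c ∈ cells.map Prod.snd ↔ ∃ r, (r, c) ∈ cells := by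
  constructor
  · intro h
    obtain ⟨⟨a, b⟩, hp, he⟩ := List.mem_map.mp h
    cases he
    exact ⟨a, hp⟩
  · rintro ⟨r, hr⟩
    exact List.mem_map.mpr ⟨(r, c), hr, rfl⟩

-- a row of the square grid view
theorem pvGrid_get (patch : List (List Int)) (r : Nat) (hr : r < patch.length) :
    (patch.map (fun row => (List.range patch.length).map (fun c => row.getD c (-1)))).getD r []
      = (List.range patch.length).map (fun c => (patch.getD r []).getD c (-1)) := by
  rw [List.getD_eq_getElem _ [] (by simpa using hr), List.getElem_map,
    List.getD_eq_getElem patch [] hr]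

-- pvBlank of a mapped range row
theorem pvBlank_map_range (n : Nat) (f : Nat → Int) :
    pvBlank ((List.range n).map f) = false ↔ ∃ c, c < n ∧ f c ≠ -1 := by
  simp [pvBlank]

-- getD on a mapped range' list, in range
theorem pvGetD_map_range' {α : Type} (s k : Nat) (f : Nat → α) (d : α) (i : Nat) (hi : i < k) :
    (((List.range' s k).map f).getD i d) = f (s + i) := by
  rw [List.getD_eq_getElem _ _ (by simpa using hi), List.getElem_map, List.getElem_range']
  simp

-- getD with any default on a mapped range list, in range
theorem pvGetD_map_range_g {α : Type} (n : Nat) (f : Nat → α) (d : α) (c : Nat) (hc : c < n) :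
    (((List.range n).map f).getD c d) = f c := by
  rw [List.getD_eq_getElem _ _ (by simpa using hc), List.getElem_map, List.getElem_range]

theorem pvZipT_cons (a : List Int) (t : List (List Int)) :
    pvZipT (a :: t) = (List.range a.length).map (fun c => (a :: t).map (fun row => row.getD c (-1))) := rfl

-- a map over range' re-indexed from zero
theorem pvMap_range' {α : Type} (s k : Nat) (F : Nat → α) :
    (List.range' s k).map F = (List.range k).map (fun i => F (s + i)) := by
  rw [List.range'_eq_map_range, List.map_map]
  rfl

-- pvBlank over a mapped list, as existence of a non-(-1) image
theorem pvBlank_map {α : Type} (l : List α) (f : α → Int) :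
    pvBlank (l.map f) = false ↔ ∃ i ∈ l, f i ≠ -1 := by
  simp [pvBlank]

-- pvZipT of a nonempty uniform family of rows indexed by range'
theorem pvZipT_map_range' (s k' w : Nat) (f : Nat → List Int) (hlen : (f s).length = w) :
    pvZipT ((List.range' s (k' + 1)).map f)
      = (List.range w).map (fun c => ((List.range' s (k' + 1)).map f).map (fun row => row.getD c (-1))) := by
  rw [List.range'_succ, List.map_cons, pvZipT_cons, hlen]

-- ===== VERDICT (by name: the statement is the Claim_ definition above) =====
theorem ofa_py_spec : Claim_equal_ofa_py := by
  intro patch _ _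
  unfold Spec_ofa_py ofa_py ofa_py_alt
  simp only []
  set flat := patch.flatMap (fun row => row.filter (fun v => decide (v ≠ -1))) with hflat
  by_cases hfe : flat.isEmpty
  · simp [hfe]
  · simp only [hfe]
    obtain ⟨m, hm⟩ : ∃ m, PySem.List.min? flat (fun x => x) = some m := by
      cases h : PySem.List.min? flat (fun x => x) with
      | none => exact absurd (List.isEmpty_iff.mpr ((PySem.List.min?_eq_none_iff _ _).mp h)) hfe
      | some m => exact ⟨m, rfl⟩
    rw [hm]
    simp only [Option.getD_some, List.length_map]
    set n := patch.length with hn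
    -- rewrite A's double loop into a fold over the coordinate list
    have hloop :
        (List.range n).foldl (fun s r =>
            (List.range n).foldl (fun s c =>
              if ((patch.map (fun row => row.map (fun v => if v ≠ -1 then v - m else -1))).getD r []).getD c (-1) ≠ -1
              then pvBBoxStep s r c else s) s)
          ((none : Option Nat), (none : Option Nat), (none : Option Nat), (none : Option Nat))
        = ((List.range n).flatMap (fun r =>
              ((List.range n).filter (fun c => decide ((patch.getD r []).getD c (-1) ≠ -1))).map
                (fun c => (r, c)))).foldl (fun s p => pvBBoxStep s p.1 p.2)
            (none, none, none, none) := by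
      rw [List.foldl_flatMap]
      congr 1
      funext s r
      rw [List.foldl_map, List.foldl_filter]
      congr 1
      funext s' c
      rw [pvCell_bridge]
      have heq := not_iff_not.mp (pvPred_bridge patch m (hflat ▸ hm) r c)
      simp only [List.getD_eq_getElem?_getD] at heq
      simp [heq]
    rw [hloop]
    set cells := (List.range n).flatMap (fun r =>
      ((List.range n).filter (fun c => decide ((patch.getD r []).getD c (-1) ≠ -1))).map
        (fun c => (r, c))) with hcells
    rw [pvFold_decomp, pvFoldMin_eq_min?, pvFoldMax_eq_max?, pvFoldMin_eq_min?, pvFoldMax_eq_max?]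
    set G := patch.map (fun row => (List.range n).map (fun c => row.getD c (-1))) with hG
    have hGlen : G.length = n := by simp [hG, hn]
    have hmem : ∀ r c : Nat, ((r, c) ∈ cells) ↔
        (r < n ∧ c < n ∧ (patch.getD r []).getD c (-1) ≠ -1) := by
      intro r c; rw [hcells]; exact pvMem_cells patch n r c
    have hGget : ∀ r, r < n → G.getD r [] =
        (List.range n).map (fun c => (patch.getD r []).getD c (-1)) := by
      intro r hr; rw [hG, hn]; exact pvGrid_get patch r (hn ▸ hr)
    by_cases hce : cells.isEmpty
    · -- no non-(-1) square cell: A returns [] through the `_` match arm, B through the rows-empty branch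
      have h0 : cells = [] := List.isEmpty_iff.mp hce
      have hallb : ∀ x ∈ G, pvBlank x = true := by
        intro x hx
        obtain ⟨r, hr, hxe⟩ := List.mem_iff_getElem.mp hx
        have hrn : r < n := hGlen ▸ hr
        have hxg : x = G.getD r [] := by rw [List.getD_eq_getElem _ _ hr, hxe]
        rw [hxg, hGget r hrn]
        by_contra hb
        rw [Bool.not_eq_true] at hb
        obtain ⟨c, hc, hv⟩ := (pvBlank_map_range n _).mp hb
        have : (r, c) ∈ cells := (hmem r c).mpr ⟨hrn, hc, hv⟩
        rw [h0] at this
        simp at this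
      have htrim : pvTrim G = [] := by
        unfold pvTrim
        rw [List.dropWhile_eq_nil_iff.mpr hallb]
        rfl
      rw [htrim]
      simp [h0, PySem.List.min?, PySem.List.max?]
    · -- some non-(-1) square cell
      have h0 : cells ≠ [] := fun h => hce (List.isEmpty_iff.mpr h)
      have hrsne : cells.map Prod.fst ≠ [] := by simpa using h0
      have hcsne : cells.map Prod.snd ≠ [] := by simpa using h0
      obtain ⟨r0, hr0⟩ : ∃ x, PySem.List.min? (cells.map Prod.fst) (fun x => x) = some x := by
        cases h : PySem.List.min? (cells.map Prod.fst) (fun x => x) with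
        | none => exact absurd ((PySem.List.min?_eq_none_iff _ _).mp h) hrsne
        | some x => exact ⟨x, rfl⟩
      obtain ⟨r1, hr1⟩ : ∃ x, PySem.List.max? (cells.map Prod.fst) (fun x => x) = some x := by
        cases h : PySem.List.max? (cells.map Prod.fst) (fun x => x) with
        | none => exact absurd ((PySem.List.max?_eq_none_iff _ _).mp h) hrsne
        | some x => exact ⟨x, rfl⟩
      obtain ⟨c0, hc0⟩ : ∃ x, PySem.List.min? (cells.map Prod.snd) (fun x => x) = some x := by
        cases h : PySem.List.min? (cells.map Prod.snd) (fun x => x) with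
        | none => exact absurd ((PySem.List.min?_eq_none_iff _ _).mp h) hcsne
        | some x => exact ⟨x, rfl⟩
      obtain ⟨c1, hc1⟩ : ∃ x, PySem.List.max? (cells.map Prod.snd) (fun x => x) = some x := by
        cases h : PySem.List.max? (cells.map Prod.snd) (fun x => x) with
        | none => exact absurd ((PySem.List.max?_eq_none_iff _ _).mp h) hcsne
        | some x => exact ⟨x, rfl⟩
      rw [hr0, hr1, hc0, hc1]
      -- basic facts about the extremal indices
      have hr0mem := PySem.List.min?_mem hr0
      have hr1mem := PySem.List.max?_mem hr1
      have hc0mem := PySem.List.min?_mem hc0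
      have hc1mem := PySem.List.max?_mem hc1
      obtain ⟨cr0, hcr0⟩ := (pvMem_map_fst cells r0).mp hr0mem
      obtain ⟨cr1, hcr1⟩ := (pvMem_map_fst cells r1).mp hr1mem
      obtain ⟨rc0, hrc0⟩ := (pvMem_map_snd cells c0).mp hc0mem
      obtain ⟨rc1, hrc1⟩ := (pvMem_map_snd cells c1).mp hc1mem
      have hr0n : r0 < n := ((hmem _ _).mp hcr0).1
      have hr1n : r1 < n := ((hmem _ _).mp hcr1).1
      have hc0n : c0 < n := ((hmem _ _).mp hrc0).2.1
      have hc1n : c1 < n := ((hmem _ _).mp hrc1).2.1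
      have hr01 : r0 ≤ r1 := PySem.List.min?_isMin hr0 r1 hr1mem
      have hc01 : c0 ≤ c1 := PySem.List.min?_isMin hc0 c1 hc1mem
      have hin_rs : ∀ r c, (r, c) ∈ cells → r0 ≤ r ∧ r ≤ r1 := by
        intro r c hc
        have hmm : r ∈ cells.map Prod.fst := (pvMem_map_fst cells r).mpr ⟨c, hc⟩
        exact ⟨PySem.List.min?_isMin hr0 r hmm, PySem.List.max?_isMax hr1 r hmm⟩
      have hin_cs : ∀ r c, (r, c) ∈ cells → c0 ≤ c ∧ c ≤ c1 := by
        intro r c hc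
        have hmm : c ∈ cells.map Prod.snd := (pvMem_map_snd cells c).mpr ⟨r, hc⟩
        exact ⟨PySem.List.min?_isMin hc0 c hmm, PySem.List.max?_isMax hc1 c hmm⟩
      have hGelem : ∀ j (hj : j < G.length),
          G[j] = (List.range n).map (fun c => (patch.getD j []).getD c (-1)) := by
        intro j hj
        rw [← List.getD_eq_getElem G [] hj, hGget j (by omega)]
      have hrowblank : ∀ j (hj : j < G.length),
          (pvBlank G[j] = false ↔ ∃ c, (j, c) ∈ cells) := by
        intro j hj
        rw [hGelem j hj, pvBlank_map_range]
        constructor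
        · rintro ⟨c, hc, hv⟩; exact ⟨c, (hmem j c).mpr ⟨by omega, hc, hv⟩⟩
        · rintro ⟨c, hc⟩
          obtain ⟨_, h2, h3⟩ := (hmem j c).mp hc
          exact ⟨c, h2, h3⟩
      -- STEP 1: row trimming is the row slice r0..r1
      have htrimG : pvTrim G = (G.drop r0).take (r1 + 1 - r0) := by
        refine pvTrim_eq_slice G r0 r1 hr01 (by omega)
          (fun j hj hjr => ?_) ?_ (fun j hj hjr => ?_) ?_
        · by_contra hb
          rw [Bool.not_eq_true] at hb
          obtain ⟨c, hc⟩ := (hrowblank j hj).mp hb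
          have := (hin_rs j c hc).1
          omega
        · exact (hrowblank r0 (by omega)).mpr ⟨cr0, hcr0⟩
        · by_contra hb
          rw [Bool.not_eq_true] at hb
          obtain ⟨c, hc⟩ := (hrowblank j hj).mp hb
          have := (hin_rs j c hc).2
          omega
        · exact (hrowblank r1 (by omega)).mpr ⟨cr1, hcr1⟩
      set kr := r1 + 1 - r0 with hkr
      set kc := c1 + 1 - c0 with hkc
      have hrows : pvTrim G = (List.range' r0 kr).map
          (fun i => (List.range n).map (fun c => (patch.getD i []).getD c (-1))) := by
        rw [htrimG, pvSlice_eq_map_range' G [] r0 kr (by omega)]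
        apply List.map_congr_left
        intro i hi
        have hin := List.mem_range'_1.mp hi
        exact hGget i (by omega)
      rw [hrows]
      have hEmpty : (((List.range' r0 kr).map
          (fun i => (List.range n).map (fun c => (patch.getD i []).getD c (-1)))).isEmpty) = false := by
        simp [List.range'_eq_nil_iff]
        omega
      rw [hEmpty]
      simp only [Bool.false_eq_true, if_false]
      -- STEP 2: the first transposition
      obtain ⟨kr', hkr'⟩ : ∃ kr', kr = kr' + 1 := ⟨kr - 1, by omega⟩
      have hZ : pvZipT ((List.range' r0 kr).map
            (fun i => (List.range n).map (fun c => (patch.getD i []).getD c (-1))))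
          = (List.range n).map (fun c => (List.range' r0 kr).map
              (fun i => (patch.getD i []).getD c (-1))) := by
        rw [hkr', pvZipT_map_range' r0 kr' n _ (by simp)]
        rw [← hkr']
        apply List.map_congr_left
        intro c hc
        rw [List.map_map]
        apply List.map_congr_left
        intro i hi
        exact pvGetD_map_range_g n _ (-1) c (List.mem_range.mp hc)
      rw [hZ]
      -- column blankness ↔ no cell in that column
      have hcolblank : ∀ c, c < n →
          (pvBlank ((List.range' r0 kr).map (fun i => (patch.getD i []).getD c (-1))) = false
            ↔ ∃ r, (r, c) ∈ cells) := by
        intro c hc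
        rw [pvBlank_map]
        constructor
        · rintro ⟨i, hi, hv⟩
          have hin := List.mem_range'_1.mp hi
          exact ⟨i, (hmem i c).mpr ⟨by omega, hc, hv⟩⟩
        · rintro ⟨r, hr⟩
          obtain ⟨h1, _, h3⟩ := (hmem r c).mp hr
          have := hin_rs r c hr
          exact ⟨r, List.mem_range'_1.mpr (by omega), h3⟩
      -- STEP 3: column trimming is the column slice c0..c1
      have hZlen : ((List.range n).map (fun c => (List.range' r0 kr).map
          (fun i => (patch.getD i []).getD c (-1)))).length = n := by simp
      have hZelem : ∀ j (hj : j < n),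
          ((List.range n).map (fun c => (List.range' r0 kr).map
            (fun i => (patch.getD i []).getD c (-1))))[j]'(by omega)
          = (List.range' r0 kr).map (fun i => (patch.getD i []).getD j (-1)) := by
        intro j hj
        rw [List.getElem_map, List.getElem_range]
      have htrimZ' : pvTrim ((List.range n).map (fun c => (List.range' r0 kr).map
            (fun i => (patch.getD i []).getD c (-1))))
          = ((((List.range n).map (fun c => (List.range' r0 kr).map
              (fun i => (patch.getD i []).getD c (-1)))).drop c0).take (c1 + 1 - c0)) := by
        refine pvTrim_eq_slice _ c0 c1 hc01 (by simpa using hc1n)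
          (fun j hj hjc => ?_) ?_ (fun j hj hjc => ?_) ?_
        · simp only [List.getElem_map, List.getElem_range]
          by_contra hb
          rw [Bool.not_eq_true] at hb
          obtain ⟨r, hr⟩ := (hcolblank j (by simpa using hj)).mp hb
          have := (hin_cs r j hr).1
          omega
        · simp only [List.getElem_map, List.getElem_range]
          exact (hcolblank c0 hc0n).mpr ⟨rc0, hrc0⟩
        · simp only [List.getElem_map, List.getElem_range]
          by_contra hb
          rw [Bool.not_eq_true] at hb
          obtain ⟨r, hr⟩ := (hcolblank j (by simpa using hj)).mp hb
          have := (hin_cs r j hr).2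
          omega
        · simp only [List.getElem_map, List.getElem_range]
          exact (hcolblank c1 hc1n).mpr ⟨rc1, hrc1⟩
      have htrimZ : pvTrim ((List.range n).map (fun c => (List.range' r0 kr).map
            (fun i => (patch.getD i []).getD c (-1))))
          = (List.range' c0 kc).map (fun c => (List.range' r0 kr).map
              (fun i => (patch.getD i []).getD c (-1))) := by
        rw [htrimZ', pvSlice_eq_map_range' _ [] c0 kc (by simp; omega)]
        apply List.map_congr_left
        intro c hc
        have hin := List.mem_range'_1.mp hc
        exact pvGetD_map_range_g n _ [] c (by omega)
      rw [htrimZ]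
      -- STEP 4: the second transposition
      obtain ⟨kc', hkc'⟩ : ∃ kc', kc = kc' + 1 := ⟨kc - 1, by omega⟩
      have hZ2 : pvZipT ((List.range' c0 kc).map (fun c => (List.range' r0 kr).map
            (fun i => (patch.getD i []).getD c (-1))))
          = (List.range kr).map (fun i => (List.range' c0 kc).map
              (fun c => (patch.getD (r0 + i) []).getD c (-1))) := by
        rw [hkc', pvZipT_map_range' c0 kc' kr _ (by simp)]
        rw [← hkc']
        apply List.map_congr_left
        intro i hi
        rw [List.map_map]
        apply List.map_congr_left
        intro c hc
        exact pvGetD_map_range' r0 kr _ (-1) i (List.mem_range.mp hi)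
      rw [hZ2]
      -- STEP 5: both sides are now the same doubly-mapped grid
      rw [pvMap_range' r0 kr, List.map_map]
      apply List.map_congr_left
      intro i hi
      simp only [Function.comp]
      rw [List.map_map]
      apply List.map_congr_left
      intro c hc
      simp only [Function.comp]
      rw [pvCell_bridge]
      rfl
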